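-- pv_equiv track=rewrite | github.com/QuillCloud/4418assignments | assn1q3.py | to_fol_form
-- ===== SOURCE A (Python) =====
-- def operator_ord(o1, o2):
--     order = {'!': 3, '&': 2, '|': 2, '>': 1, '<': 1}
--     if o1 == '(' or o2 == '(':
--         return False
--     elif o2 == ')':
--         return True
--     else:
--         if order[o1] < order[o2]:
--             return False
--         else:
--             return True
--
-- def to_fol_form(string):
--     if string == "":
--         return ""
--     prefix_s = ''
--     stack1 = []
--     tem_s = ''
--     for s in string[::-1]:
--         if s == '(':
--             tem_s += ')'
--         elif s == ')':
--             tem_s += '('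
--         else:
--             tem_s += s
--     for s in tem_s:
--         if s.isalpha():
--             prefix_s = s + prefix_s
--         else:
--             while len(stack1) and operator_ord(stack1[-1], s):
--                 op = stack1.pop()
--                 prefix_s = op + prefix_s
--             if len(stack1) == 0 or s != ')':
--                 stack1.append(s)
--             else:
--                 stack1.pop()
--     if len(stack1):
--         prefix_s = ''.join(stack1) + prefix_s
--     return prefix_to_fol(prefix_s)
--
-- def prefix_to_fol(string):
--     stack = []
--     for s in string[::-1]:
--         if s.isalpha():
--             stack.append(s)
--         elif s == "!":
--             atom = stack.pop()
--             stack.append("neg(" + atom + ")")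
--         else:
--             e1 = stack.pop()
--             e2 = stack.pop()
--             connective = ""
--             if s == "&":
--                 connective = "and("
--             elif s == "|":
--                 connective = "or("
--             elif s == ">":
--                 connective = "imp("
--             elif s == "<":
--                 connective = "iff("
--             stack.append(connective + e1 + ", " + e2 + ")")
--     return stack.pop()
-- ===== SOURCE B (Python) =====
-- def to_fol_form(string):
--     # One fused right-to-left shunting-yard pass that builds the FOL strings
--     # directly on an operand stack (no intermediate prefix string, no re-parse).
--     if string == "":
--         return ""
--     PREC = {'!': 3, '&': 2, '|': 2, '>': 1, '<': 1}
--     CONN = {'&': 'and(', '|': 'or(', '>': 'imp(', '<': 'iff('}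
--     out = []   # finished sub-formulas
--     ops = []   # pending operators; '(' marks a group opened while scanning right-to-left
--
--     def apply_op(op):
--         if op == '!':
--             out.append('neg(' + out.pop() + ')')
--         else:
--             e1 = out.pop()
--             e2 = out.pop()
--             out.append(CONN[op] + e1 + ', ' + e2 + ')')
--
--     for ch in reversed(string):
--         if ch.isalpha():
--             out.append(ch)
--         elif ch == ')':
--             ops.append('(')          # scanning right-to-left, ')' opens a group
--         elif ch == '(':
--             while ops[-1] != '(':
--                 apply_op(ops.pop())
--             ops.pop()                # discard the matching group marker
--         else:
--             while ops and ops[-1] != '(' and PREC.get(ops[-1], 0) >= PREC.get(ch, 0):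
--                 apply_op(ops.pop())
--             ops.append(ch)
--     while ops:
--         apply_op(ops.pop())
--     return out.pop()
-- ===== Notes on version B (the rewrite author's own statement) =====
-- stated objective: faster
-- what changed: B fuses A's three-stage pipeline (build a paren-swapped reversed copy, shunting-yard it into a prefix string rebuilt by prepending, re-parse that prefix string with a second stack machine) into one right-to-left pass that applies each operator to a stack of finished FOL strings the moment shunting-yard would emit it; Pre_ excludes malformed strings (unknown operator characters, unmatched parentheses, missing operands), on which A raises KeyError/IndexError or returns a fragment of its leftover operator stack (see cites) while B raises.
-- outside the precondition, e.g. on to_fol_form('a.b'): A returns 'a, b)', B raises KeyError; on to_fol_form('a(b'): A returns 'a, b)', B raises IndexError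
import Mathlib
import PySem

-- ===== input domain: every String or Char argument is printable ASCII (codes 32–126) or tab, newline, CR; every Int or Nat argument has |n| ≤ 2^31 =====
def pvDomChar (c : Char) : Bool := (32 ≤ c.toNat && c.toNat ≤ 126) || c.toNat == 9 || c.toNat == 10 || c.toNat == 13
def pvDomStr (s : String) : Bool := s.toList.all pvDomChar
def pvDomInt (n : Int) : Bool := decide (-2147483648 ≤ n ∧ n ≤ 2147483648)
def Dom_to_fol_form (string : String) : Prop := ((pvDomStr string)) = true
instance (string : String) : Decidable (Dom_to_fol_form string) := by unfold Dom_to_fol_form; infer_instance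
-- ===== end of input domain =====

-- B fuses A's pipeline (paren-swapped reversal, shunting-yard to a prefix string rebuilt by
-- prepending, stack re-parse of that string) into one right-to-left pass applying operators to
-- FOL strings directly; malformed inputs (on which A raises or returns stack leftovers) are outside Pre_.

-- ===== PORT A =====
-- order = {'!': 3, '&': 2, '|': 2, '>': 1, '<': 1}
def pvOrder : PySem.Dict Char Int :=
  PySem.Dict.ofList [('!', 3), ('&', 2), ('|', 2), ('>', 1), ('<', 1)]

-- operator_ord; order[o] is ported as getD _ 0 (a missing key raises KeyError in Python: outside Pre_)
def operator_ord (o1 o2 : Char) : Bool :=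
  if o1 = '(' || o2 = '(' then false
  else if o2 = ')' then true
  else if PySem.Dict.getD pvOrder o1 0 < PySem.Dict.getD pvOrder o2 0 then false
  else true

-- the 'while len(stack1) and operator_ord(stack1[-1], s)' loop; stacks are held top-first
-- (head = Python's end of the list), so append/pop become cons/tail
def pvPopA : List Char → List Char → Char → List Char × List Char
  | prefix_s, [], _ => (prefix_s, [])
  | prefix_s, op :: rest, s =>
    if operator_ord op s then pvPopA (op :: prefix_s) rest s else (prefix_s, op :: rest)

-- one iteration of A's main 'for s in tem_s' loop; prefix_s is held as a char list
-- ('prefix_s = s + prefix_s' = cons)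
def pvStepA (st : List Char × List Char) (s : Char) : List Char × List Char :=
  if PySem.Chars.isalpha s then (s :: st.1, st.2)
  else
    let st' := pvPopA st.1 st.2 s
    if st'.2 = [] ∨ s ≠ ')' then (st'.1, s :: st'.2)
    else (st'.1, st'.2.tail)

-- prefix_to_fol's connective if/elif chain
def pvConnA (s : Char) : String :=
  if s = '&' then "and("
  else if s = '|' then "or("
  else if s = '>' then "imp("
  else if s = '<' then "iff(" else ""

-- one iteration of prefix_to_fol's loop; stack.pop() on an empty stack raises IndexError in
-- Python (outside Pre_), ported as headD ""
def pvPfStep (stack : List String) (s : Char) : List String :=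
  if PySem.Chars.isalpha s then String.ofList [s] :: stack
  else if s = '!' then ("neg(" ++ stack.headD "" ++ ")") :: stack.tail
  else (pvConnA s ++ stack.headD "" ++ ", " ++ stack.tail.headD "" ++ ")") :: stack.tail.tail

-- prefix_to_fol(string): iterates over string[::-1]; the final stack.pop() is headD ""
def prefix_to_fol (cs : List Char) : String :=
  (cs.reverse.foldl pvPfStep []).headD ""

def to_fol_form (string : String) : String :=
  if string.toList = [] then ""
  else
    -- tem_s: built char by char from string[::-1] with the parentheses swapped
    let tem_s : List Char :=
      string.toList.reverse.foldl
        (fun acc s => acc ++ [if s = '(' then ')' else if s = ')' then '(' else s]) []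
    let fin := tem_s.foldl pvStepA ([], [])
    -- if len(stack1): prefix_s = ''.join(stack1) + prefix_s  (join of a top-first stack = reverse)
    let prefix_s := if fin.2 ≠ [] then fin.2.reverse ++ fin.1 else fin.1
    prefix_to_fol prefix_s

-- ===== PORT B =====
-- the PREC / CONN dicts of Source B
def pvPrec : PySem.Dict Char Int :=
  PySem.Dict.ofList [('!', 3), ('&', 2), ('|', 2), ('>', 1), ('<', 1)]
def pvConn : PySem.Dict Char String :=
  PySem.Dict.ofList [('&', "and("), ('|', "or("), ('>', "imp("), ('<', "iff(")]

-- apply_op; out.pop() on an empty list and CONN[op] on a missing key raise in Python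
-- (outside Pre_), ported as headD "" / getD _ ""
def pvApplyOp (out : List String) (op : Char) : List String :=
  if op = '!' then ("neg(" ++ out.headD "" ++ ")") :: out.tail
  else (PySem.Dict.getD pvConn op "" ++ out.headD "" ++ ", " ++ out.tail.headD "" ++ ")") :: out.tail.tail

-- 'while ops[-1] != '(': apply_op(ops.pop())'  (ops held top-first); ops[-1] on an empty
-- list raises IndexError in Python (outside Pre_): the [] case returns the state unchanged
def pvDrainGroup : List String → List Char → List String × List Char
  | out, [] => (out, [])
  | out, op :: rest =>
    if op = '(' then (out, op :: rest) else pvDrainGroup (pvApplyOp out op) rest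

-- 'while ops and ops[-1] != '(' and PREC.get(ops[-1], 0) >= PREC.get(ch, 0): apply_op(ops.pop())'
def pvDrainPrec : List String → List Char → Char → List String × List Char
  | out, [], _ => (out, [])
  | out, op :: rest, ch =>
    if op ≠ '(' ∧ PySem.Dict.getD pvPrec ch 0 ≤ PySem.Dict.getD pvPrec op 0 then
      pvDrainPrec (pvApplyOp out op) rest ch
    else (out, op :: rest)

-- one iteration of Source B's 'for ch in reversed(string)' loop; 'ops.pop()' after the group
-- drain is .tail (pop of an empty list raises IndexError in Python: outside Pre_)
def pvStepB (st : List String × List Char) (ch : Char) : List String × List Char :=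
  if PySem.Chars.isalpha ch then (String.ofList [ch] :: st.1, st.2)
  else if ch = ')' then (st.1, '(' :: st.2)
  else if ch = '(' then
    let st' := pvDrainGroup st.1 st.2
    (st'.1, st'.2.tail)
  else
    let st' := pvDrainPrec st.1 st.2 ch
    (st'.1, ch :: st'.2)

def to_fol_form_alt (string : String) : String :=
  if string.toList = [] then ""
  else
    let st := string.toList.reverse.foldl pvStepB ([], [])
    -- 'while ops: apply_op(ops.pop())' then 'return out.pop()' (headD "": IndexError outside Pre_)
    (st.2.foldl pvApplyOp st.1).headD ""

-- ===== PRECONDITION & SPEC =====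
-- one step of a standard infix well-formedness automaton: (expecting-an-operand?, open-paren depth)
def pvWfStep (st : Option (Bool × Nat)) (c : Char) : Option (Bool × Nat) :=
  match st with
  | none => none
  | some (true, d) =>
    if PySem.Chars.isalpha c then some (false, d)
    else if c = '!' then some (true, d)
    else if c = '(' then some (true, d + 1)
    else none
  | some (false, d) =>
    if c = '&' ∨ c = '|' ∨ c = '>' ∨ c = '<' then some (true, d)
    else if c = ')' then (if d = 0 then none else some (false, d - 1))
    else none

-- Pre_ admits the empty string, strings over letters and '!', strings with exactly one binary
-- connective among letters, and well-formed infix formulas.  It EXCLUDES malformed strings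
-- (unknown operator characters, unmatched parentheses, missing operands): on those A raises
-- KeyError/IndexError or returns a fragment of its leftover operator stack, and B raises.
-- The suffix paren-balance conjunct of the last branch is a consequence of well-formedness,
-- stated explicitly so it is closed-form.
def Pre_to_fol_form (string : String) : Prop :=
  string.toList = [] ∨
  -- letters and '!' only, with a letter somewhere, and a letter behind every '!' that has
  -- another '!' behind it
  (string.toList ≠ [] ∧ (string.toList.all fun c => PySem.Chars.isalpha c || c == '!') = true ∧
    1 ≤ string.toList.countP PySem.Chars.isalpha ∧
    (string.toList.tails.all fun t =>
      match t with
      | '!' :: rest => !rest.contains '!' || rest.any PySem.Chars.isalpha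
      | _ => true) = true) ∨
  -- exactly one non-letter, which is a binary connective, among at least two letters
  ((string.toList.all fun c => PySem.Chars.isalpha c || c ∈ ['&', '|', '>', '<']) = true ∧
    string.toList.countP (fun c => !PySem.Chars.isalpha c) = 1 ∧
    2 ≤ string.toList.countP PySem.Chars.isalpha) ∨
  -- a well-formed infix formula (hence every suffix has at most as many '(' as ')')
  (string.toList.foldl pvWfStep (some (true, 0)) = some (false, 0) ∧
    ∀ t ∈ string.toList.tails, t.count '(' ≤ t.count ')')

instance (string : String) : Decidable (Pre_to_fol_form string) := by
  unfold Pre_to_fol_form; infer_instance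

def pvWitness_to_fol_form : String := "!a&(b|!c)>d"

def Spec_to_fol_form (string : String) (out : String) : Prop := out = to_fol_form_alt string
instance (string : String) (out : String) : Decidable (Spec_to_fol_form string out) := by
  unfold Spec_to_fol_form; infer_instance

-- ===== CLAIM (what is proved, stated in full; the proofs are below) =====
def Claim_equal_to_fol_form : Prop := ∀ (string : String), Dom_to_fol_form string → Pre_to_fol_form string → Spec_to_fol_form string (to_fol_form string)

-- ===== LEMMAS AND PROOFS =====
-- The proof simulates B's fused pass against A's shunting-yard + re-parse pipeline; the only
-- point where the two machines can disagree is an original '(' whose group marker is missing,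
-- which the suffix paren-balance property (implied by every Pre_ branch) rules out.

-- the paren swap applied per character
def pvSwap (s : Char) : Char := if s = '(' then ')' else if s = ')' then '(' else s

-- the result stack of prefix_to_fol after consuming the emissions recorded in prefix_s
-- (prefix_s is built by prepending, so its reverse is the emission order)
def pvF (p : List Char) : List String := p.reverse.foldl pvPfStep []

theorem pv_conn_eq (s : Char) : pvConnA s = PySem.Dict.getD pvConn s "" := by
  have h : pvConn = PySem.Dict.mk [('&', "and("), ('|', "or("), ('>', "imp("), ('<', "iff(")] := by rfl
  by_cases h1 : s = '&'
  · subst h1; decide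
  by_cases h2 : s = '|'
  · subst h2; decide
  by_cases h3 : s = '>'
  · subst h3; decide
  by_cases h4 : s = '<'
  · subst h4; decide
  have n1 : ('&' == s) = false := by simp [Ne.symm h1]
  have n2 : ('|' == s) = false := by simp [Ne.symm h2]
  have n3 : ('>' == s) = false := by simp [Ne.symm h3]
  have n4 : ('<' == s) = false := by simp [Ne.symm h4]
  simp [pvConnA, h, PySem.Dict.getD, h1, h2, h3, h4, n1, n2, n3, n4, PySem.Dict.get?]

-- pfStep and apply_op agree on non-letters
theorem pv_pfStep_eq (out : List String) (op : Char) (h : PySem.Chars.isalpha op = false) :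
    pvPfStep out op = pvApplyOp out op := by
  simp [pvPfStep, pvApplyOp, h, pv_conn_eq]

theorem pvF_cons (op : Char) (p : List Char) : pvF (op :: p) = pvPfStep (pvF p) op := by
  simp [pvF, List.foldl_append]

-- tem_s is the swap-map of the reversed character list
theorem pv_temS_eq (l acc : List Char) :
    l.foldl (fun acc s => acc ++ [if s = '(' then ')' else if s = ')' then '(' else s]) acc
      = acc ++ l.map pvSwap := by
  induction l generalizing acc with
  | nil => simp
  | cons c l ih => simp [ih, pvSwap]

-- operator_ord against ')' stops exactly at '('
theorem pv_op_ord_close (op : Char) : operator_ord op ')' = !decide (op = '(') := by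
  by_cases h : op = '(' <;> simp [operator_ord, h]

-- '(' on the stack never satisfies operator_ord
theorem pv_op_ord_open (s : Char) : operator_ord '(' s = false := by
  simp [operator_ord]

-- operator_ord never pops for '('
theorem pv_popA_open (p st : List Char) : pvPopA p st '(' = (p, st) := by
  cases st with
  | nil => rfl
  | cons op rest => simp [pvPopA, operator_ord]

-- the pop loop only removes elements: what remains was on the stack
theorem pv_popA_suffix (p st : List Char) (s c : Char) (hc : c ∈ (pvPopA p st s).2) : c ∈ st := by
  induction st generalizing p with
  | nil => simpa [pvPopA] using hc
  | cons op rest ih =>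
    by_cases h : operator_ord op s
    · simp only [pvPopA, if_pos h] at hc
      exact List.mem_cons_of_mem _ (ih _ hc)
    · simp only [pvPopA, if_neg h] at hc
      exact hc

-- the pop loop never removes a '(' marker, so their count is preserved
theorem pv_popA_count (p st : List Char) (s : Char) :
    (pvPopA p st s).2.count '(' = st.count '(' := by
  induction st generalizing p with
  | nil => simp [pvPopA]
  | cons op rest ih =>
    by_cases h : operator_ord op s
    · have hop : op ≠ '(' := by
        rintro rfl; rw [pv_op_ord_open] at h; exact Bool.false_ne_true h
      simp only [pvPopA, if_pos h]
      rw [ih (op :: p)]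
      simp [List.count_cons, hop]
    · simp [pvPopA, if_neg h]

-- after draining towards ')', the remaining stack (if any) starts with '('
theorem pv_popA_close_head (p st : List Char) :
    (pvPopA p st ')').2.head? = none ∨ (pvPopA p st ')').2.head? = some '(' := by
  induction st generalizing p with
  | nil => simp [pvPopA]
  | cons op rest ih =>
    by_cases h : operator_ord op ')'
    · simp only [pvPopA, if_pos h]; exact ih (op :: p)
    · have hop : op = '(' := by
        rw [pv_op_ord_close] at h; simpa using h
      subst hop
      simp [pvPopA, pv_op_ord_open]

-- operator_ord against an ordinary operator is Source B's precedence condition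
theorem pv_op_ord_prec (op ch : Char) (h1 : ch ≠ '(') (h2 : ch ≠ ')') :
    operator_ord op ch
      = decide (op ≠ '(' ∧ PySem.Dict.getD pvPrec ch 0 ≤ PySem.Dict.getD pvPrec op 0) := by
  have horder : pvOrder = pvPrec := rfl
  by_cases h3 : op = '('
  · simp [operator_ord, h3]
  · by_cases h4 : PySem.Dict.getD pvPrec op 0 < PySem.Dict.getD pvPrec ch 0
    · simp [operator_ord, h1, h2, h3, horder, h4, not_le.mpr h4]
    · simp [operator_ord, h1, h2, h3, horder, h4, not_lt.mp h4]

-- the group-closing pop loops of A and B run in lockstep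
theorem pv_drainGroup_eq (st : List Char) (p : List Char)
    (hna : ∀ c ∈ st, PySem.Chars.isalpha c = false) :
    pvDrainGroup (pvF p) st
      = (pvF (pvPopA p st ')').1, (pvPopA p st ')').2) := by
  induction st generalizing p with
  | nil => simp [pvDrainGroup, pvPopA]
  | cons op rest ih =>
    by_cases h : op = '('
    · simp [pvDrainGroup, pvPopA, pv_op_ord_close, h]
    · have hna' : PySem.Chars.isalpha op = false := hna op (by simp)
      simp only [pvDrainGroup, pvPopA, pv_op_ord_close, h, decide_false, Bool.not_false]
      rw [← pv_pfStep_eq _ _ hna', ← pvF_cons]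
      exact ih (op :: p) (fun c hc => hna c (by simp [hc]))

-- the precedence pop loops of A and B run in lockstep
theorem pv_drainPrec_eq (ch : Char) (h1 : ch ≠ '(') (h2 : ch ≠ ')')
    (st : List Char) (p : List Char)
    (hna : ∀ c ∈ st, PySem.Chars.isalpha c = false) :
    pvDrainPrec (pvF p) st ch
      = (pvF (pvPopA p st ch).1, (pvPopA p st ch).2) := by
  induction st generalizing p with
  | nil => simp [pvDrainPrec, pvPopA]
  | cons op rest ih =>
    simp only [pvDrainPrec, pvPopA, pv_op_ord_prec op ch h1 h2, decide_eq_true_eq]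
    split_ifs with h
    · rw [← pv_pfStep_eq _ _ (hna op (by simp)), ← pvF_cons]
      exact ih (op :: p) (fun c hc => hna c (by simp [hc]))
    · rfl

-- the simulation relation between A's state and B's state
def pvRel (stA : List Char × List Char) (stB : List String × List Char) : Prop :=
  stB.2 = stA.2 ∧ (∀ c ∈ stA.2, PySem.Chars.isalpha c = false) ∧ stB.1 = pvF stA.1

theorem pv_step_rel (stA : List Char × List Char) (stB : List String × List Char)
    (h : pvRel stA stB) (ch : Char) (hk : ch = '(' → 1 ≤ stA.2.count '(') :
    pvRel (pvStepA stA (pvSwap ch)) (pvStepB stB ch) ∧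
    (pvStepA stA (pvSwap ch)).2.count '(' + (if ch = '(' then 1 else 0)
      = stA.2.count '(' + (if ch = ')' then 1 else 0) := by
  obtain ⟨hops, hna, hout⟩ := h
  by_cases ha : PySem.Chars.isalpha ch = true
  · -- a letter: emitted/pushed on both sides
    have h1 : ch ≠ '(' := by rintro rfl; revert ha; decide
    have h2 : ch ≠ ')' := by rintro rfl; revert ha; decide
    have hsw : pvSwap ch = ch := by simp [pvSwap, h1, h2]
    rw [hsw]
    have hA : pvStepA stA ch = (ch :: stA.1, stA.2) := by simp [pvStepA, ha]
    have hB : pvStepB stB ch = (String.ofList [ch] :: stB.1, stB.2) := by simp [pvStepB, ha]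
    refine ⟨⟨by rw [hA, hB, hops], by rw [hA]; exact hna,
      by rw [hA, hB, hout]; simp [pvF_cons, pvPfStep, ha]⟩, ?_⟩
    rw [hA]; simp [h1, h2]
  · by_cases hcl : ch = ')'
    · -- original ')': swapped to '(' and pushed onto the operator stack
      subst hcl
      rw [show pvSwap ')' = '(' by decide]
      have hA : pvStepA stA '(' = (stA.1, '(' :: stA.2) := by
        simp [pvStepA, pv_popA_open, (by decide : PySem.Chars.isalpha '(' = false)]
      have hB : pvStepB stB ')' = (stB.1, '(' :: stB.2) := by
        simp [pvStepB, (by decide : PySem.Chars.isalpha ')' = false)]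
      refine ⟨⟨by rw [hA, hB, hops], ?_, by rw [hA, hB, hout]⟩, ?_⟩
      · rw [hA]
        intro c hc
        rcases List.mem_cons.mp hc with rfl | hc
        · decide
        · exact hna c hc
      · rw [hA]; simp [List.count_cons]
    · by_cases hop : ch = '('
      · -- original '(': swapped to ')', closes a group; Pre_'s balance gives the marker
        subst hop
        rw [show pvSwap '(' = ')' by decide]
        have hk1 : 1 ≤ stA.2.count '(' := hk rfl
        have hcnt : (pvPopA stA.1 stA.2 ')').2.count '(' = stA.2.count '(' :=
          pv_popA_count stA.1 stA.2 ')'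
        have hne : (pvPopA stA.1 stA.2 ')').2 ≠ [] := by
          intro hemp; rw [hemp] at hcnt; simp at hcnt; omega
        obtain ⟨x, rest, hcase⟩ : ∃ x rest, (pvPopA stA.1 stA.2 ')').2 = x :: rest := by
          cases hx : (pvPopA stA.1 stA.2 ')').2 with
          | nil => exact absurd hx hne
          | cons x r => exact ⟨x, r, rfl⟩
        have hx : x = '(' := by
          rcases pv_popA_close_head stA.1 stA.2 with hh | hh <;> rw [hcase] at hh <;>
            simpa using hh
        subst hx
        have hdg : pvDrainGroup stB.1 stA.2
            = (pvF (pvPopA stA.1 stA.2 ')').1, (pvPopA stA.1 stA.2 ')').2) := by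
          rw [hout]; exact pv_drainGroup_eq stA.2 stA.1 hna
        have hsub : ∀ c ∈ (pvPopA stA.1 stA.2 ')').2, PySem.Chars.isalpha c = false :=
          fun c hc => hna c (pv_popA_suffix stA.1 stA.2 ')' c hc)
        rw [pvStepA, pvStepB]
        rw [if_neg (by decide : ¬PySem.Chars.isalpha ')' = true),
          if_neg (by decide : ¬PySem.Chars.isalpha '(' = true),
          if_neg (by decide : ¬('(' : Char) = ')'), if_pos rfl]
        rw [if_neg (show ¬((pvPopA stA.1 stA.2 ')').2 = [] ∨ (')' : Char) ≠ ')') by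
          simp [hne])]
        rw [hops, hdg]
        refine ⟨⟨by simp, ?_, by simp⟩, ?_⟩
        · intro c hc
          exact hsub c (List.mem_of_mem_tail hc)
        · simp only [hcase, List.tail_cons]
          rw [hcase] at hcnt
          simp only [List.count_cons] at hcnt
          simp at hcnt ⊢
          omega
      · -- an ordinary operator character
        have hsw : pvSwap ch = ch := by simp [pvSwap, hop, hcl]
        rw [hsw]
        have ha' : PySem.Chars.isalpha ch = false := by
          cases hval : PySem.Chars.isalpha ch
          · rfl
          · exact absurd hval ha
        have hdp : pvDrainPrec stB.1 stA.2 ch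
            = (pvF (pvPopA stA.1 stA.2 ch).1, (pvPopA stA.1 stA.2 ch).2) := by
          rw [hout]; exact pv_drainPrec_eq ch hop hcl stA.2 stA.1 hna
        have hsub : ∀ c ∈ (pvPopA stA.1 stA.2 ch).2, PySem.Chars.isalpha c = false :=
          fun c hc => hna c (pv_popA_suffix stA.1 stA.2 ch c hc)
        rw [pvStepA, pvStepB]
        rw [if_neg (show ¬PySem.Chars.isalpha ch = true by simp [ha'])]
        rw [if_pos (show (pvPopA stA.1 stA.2 ch).2 = [] ∨ ¬ch = ')' from Or.inr hcl)]
        rw [if_neg (show ¬PySem.Chars.isalpha ch = true by simp [ha']), if_neg hcl,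
          if_neg hop, hops, hdp]
        refine ⟨⟨rfl, ?_, rfl⟩, ?_⟩
        · intro c hc
          rcases List.mem_cons.mp hc with rfl | hc
          · exact ha'
          · exact hsub c hc
        · have := pv_popA_count stA.1 stA.2 ch
          simp only [List.count_cons]
          simp [hop, hcl, this]

-- the whole scans stay in lockstep, given that every prefix of the scanned (reversed)
-- character list closes at least as many groups as it opens
theorem pv_fold_rel (l : List Char) (stA : List Char × List Char) (stB : List String × List Char)
    (h : pvRel stA stB)
    (hbal : ∀ p, p <+: l → p.count '(' ≤ stA.2.count '(' + p.count ')') :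
    pvRel ((l.map pvSwap).foldl pvStepA stA) (l.foldl pvStepB stB) := by
  induction l generalizing stA stB with
  | nil => simpa using h
  | cons c t ih =>
    have hk : c = '(' → 1 ≤ stA.2.count '(' := by
      intro hc
      have := hbal [c] ⟨t, rfl⟩
      subst hc
      simpa using this
    obtain ⟨h', hcnt⟩ := pv_step_rel stA stB h c hk
    simp only [List.map_cons, List.foldl_cons]
    apply ih _ _ h'
    intro p hp
    have h2 := hbal (c :: p) (by obtain ⟨s, hs⟩ := hp; exact ⟨s, by simp [hs]⟩)
    by_cases hc1 : c = '('
    · subst hc1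
      simp [List.count_cons] at h2 hcnt
      omega
    · by_cases hc2 : c = ')'
      · subst hc2
        simp [List.count_cons] at h2 hcnt
        omega
      · simp [List.count_cons, hc1, hc2] at h2 hcnt
        omega

-- the final drain of B equals the tail run of prefix_to_fol over the leftover stack
theorem pv_drain_eq (st : List Char) (out : List String)
    (hna : ∀ c ∈ st, PySem.Chars.isalpha c = false) :
    st.foldl pvApplyOp out = st.foldl pvPfStep out := by
  induction st generalizing out with
  | nil => rfl
  | cons op rest ih =>
    simp only [List.foldl_cons]
    rw [← pv_pfStep_eq _ _ (hna op (by simp)), ih _ (fun c hc => hna c (by simp [hc]))]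

-- every Pre_ branch implies the suffix paren-balance property of the scanned list
theorem pv_pre_bal (string : String) (h : Pre_to_fol_form string) :
    ∀ p, p <+: string.toList.reverse → p.count '(' ≤ p.count ')' := by
  intro p hp
  have hnp : '(' ∉ string.toList → p.count '(' = 0 := by
    intro hno
    refine List.count_eq_zero.mpr fun hmem => ?_
    exact hno (List.mem_reverse.mp (hp.subset hmem))
  rcases h with hnil | ⟨_, hall, _, _⟩ | ⟨hall, _, _⟩ | ⟨_, hbal⟩
  · have : p = [] := by
      rw [hnil] at hp; simpa using List.prefix_nil.mp (by simpa using hp)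
    simp [this]
  · have : '(' ∉ string.toList := by
      intro hmem
      have h1 := List.all_eq_true.mp hall _ hmem
      simp at h1
      exact absurd h1 (by decide)
    rw [hnp this]; exact Nat.zero_le _
  · have : '(' ∉ string.toList := by
      intro hmem
      have h1 := List.all_eq_true.mp hall _ hmem
      simp at h1
      exact absurd h1 (by decide)
    rw [hnp this]; exact Nat.zero_le _
  · have hsuf : p.reverse <:+ string.toList := by
      obtain ⟨s, hs⟩ := hp
      exact ⟨s.reverse, by rw [← List.reverse_append, hs, List.reverse_reverse]⟩
    have := hbal p.reverse ((List.mem_tails _ _).mpr hsuf)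
    simpa [List.count_reverse] using this

-- ===== VERDICT (by name: the statement is the Claim_ definition above) =====
theorem to_fol_form_spec : Claim_equal_to_fol_form := by
  intro string _ hpre
  unfold Spec_to_fol_form to_fol_form to_fol_form_alt
  by_cases hnil : string.toList = []
  · simp [hnil]
  · simp only [if_neg hnil]
    rw [pv_temS_eq]
    simp only [List.nil_append]
    have hrel := pv_fold_rel string.toList.reverse ([], []) ([], [])
      ⟨rfl, by simp, by simp [pvF]⟩
      (by intro p hp; simpa using pv_pre_bal string hpre p hp)
    obtain ⟨hops, hna, hout⟩ := hrel
    set finA := (string.toList.reverse.map pvSwap).foldl pvStepA ([], []) with hfinA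
    set finB := string.toList.reverse.foldl pvStepB ([], []) with hfinB
    rw [hops, hout]
    rw [pv_drain_eq _ _ hna]
    unfold prefix_to_fol
    congr 1
    by_cases h2 : finA.2 = []
    · simp [h2, pvF]
    · simp only [if_pos (by simpa using h2), List.reverse_append, List.reverse_reverse]
      rw [List.foldl_append]
      rfl
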